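-- pv_equiv track=rewrite | github.com/Valieologos/fxxxxtools | main.py | is_position_valid_with_list
-- ===== SOURCE A (Python) =====
-- def is_position_valid_with_list(pos, cows_list):
--     """仅返回布尔值，用于回溯"""
--     r, c = pos
--     for (rr, cc) in cows_list:
--         if rr == r or cc == c:
--             return False
--         if abs(rr - r) <= 1 and abs(cc - c) <= 1:
--             return False
--     return True
-- ===== SOURCE B (Python) =====
-- def is_position_valid_with_list(pos, cows_list):
--     """Index-build pass (row/col/cell sets) + constant number of membership probes."""
--     r, c = pos
--     rows = set()
--     cols = set()
--     cells = set()
--     for rr, cc in cows_list: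
--         rows.add(rr)
--         cols.add(cc)
--         cells.add((rr, cc))
--     if r in rows or c in cols:
--         return False
--     for dr in (-1, 0, 1):
--         for dc in (-1, 0, 1):
--             if (r + dr, c + dc) in cells:
--                 return False
--     return True
-- ===== Notes on version B (the rewrite author's own statement) =====
-- stated objective: alternative
-- what changed: Replaces the per-cow predicate scan with one pass building row/column/cell sets followed by a constant number (11) of membership probes over the 3x3 neighborhood.
import Mathlib
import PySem

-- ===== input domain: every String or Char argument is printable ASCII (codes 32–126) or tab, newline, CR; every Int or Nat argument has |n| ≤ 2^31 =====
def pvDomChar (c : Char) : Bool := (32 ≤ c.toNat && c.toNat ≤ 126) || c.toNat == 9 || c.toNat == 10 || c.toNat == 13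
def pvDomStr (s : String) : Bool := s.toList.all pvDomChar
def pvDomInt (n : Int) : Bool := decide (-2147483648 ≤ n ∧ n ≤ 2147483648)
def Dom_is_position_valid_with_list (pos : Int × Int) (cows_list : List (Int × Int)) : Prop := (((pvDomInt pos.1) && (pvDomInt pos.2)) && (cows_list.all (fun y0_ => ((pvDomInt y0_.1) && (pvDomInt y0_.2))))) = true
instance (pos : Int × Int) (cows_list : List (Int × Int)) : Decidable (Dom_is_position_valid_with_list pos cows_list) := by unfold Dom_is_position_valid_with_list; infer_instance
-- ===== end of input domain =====

-- B builds row/column/cell sets in one pass and answers with a constant number of membership probes,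
-- instead of A's per-cow predicate scan (alternative decomposition, same asymptotic cost).


-- ===== PORT A =====
-- A's for-loop with early returns, as structural recursion over cows_list
def pvLoopA (r c : Int) : List (Int × Int) → Bool
  | [] => true
  | (rr, cc) :: rest =>
    if rr == r || cc == c then false
    else if |rr - r| ≤ 1 ∧ |cc - c| ≤ 1 then false
    else pvLoopA r c rest

def is_position_valid_with_list (pos : Int × Int) (cows_list : List (Int × Int)) : Bool :=
  pvLoopA pos.1 pos.2 cows_list

-- ===== PORT B =====
def is_position_valid_with_list_alt (pos : Int × Int) (cows_list : List (Int × Int)) : Bool :=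
  let r := pos.1
  let c := pos.2
  -- one pass building the three indices (rows, cols, cells)
  let st := cows_list.foldl
    (fun (s : PySem.Set Int × PySem.Set Int × PySem.Set (Int × Int)) rc =>
      (PySem.Set.add s.1 rc.1, PySem.Set.add s.2.1 rc.2, PySem.Set.add s.2.2 rc))
    (PySem.Set.empty, PySem.Set.empty, PySem.Set.empty)
  if PySem.Set.contains st.1 r || PySem.Set.contains st.2.1 c then false
  else !(([-1, 0, 1] : List Int).any fun dr =>
          ([-1, 0, 1] : List Int).any fun dc =>
            PySem.Set.contains st.2.2 (r + dr, c + dc))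

-- ===== PRECONDITION & SPEC =====
def Spec_is_position_valid_with_list (pos : Int × Int) (cows_list : List (Int × Int)) (out : Bool) : Prop := out = is_position_valid_with_list_alt pos cows_list
instance (pos : Int × Int) (cows_list : List (Int × Int)) (out : Bool) : Decidable (Spec_is_position_valid_with_list pos cows_list out) := by unfold Spec_is_position_valid_with_list; infer_instance

-- ===== CLAIM (what is proved, stated in full; the proofs are below) =====
def Claim_equal_is_position_valid_with_list : Prop := ∀ (pos : Int × Int) (cows_list : List (Int × Int)), Dom_is_position_valid_with_list pos cows_list → Spec_is_position_valid_with_list pos cows_list (is_position_valid_with_list pos cows_list)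

-- ===== LEMMAS AND PROOFS =====

-- A's loop returns true iff no cow conflicts
theorem pvLoopA_eq_true (r c : Int) (l : List (Int × Int)) :
    pvLoopA r c l = true ↔
      ∀ p ∈ l, ¬(p.1 = r ∨ p.2 = c) ∧ ¬(|p.1 - r| ≤ 1 ∧ |p.2 - c| ≤ 1) := by
  induction l with
  | nil => simp [pvLoopA]
  | cons hd tl ih =>
    obtain ⟨rr, cc⟩ := hd
    simp only [pvLoopA, List.mem_cons]
    split_ifs with h1 h2
    · simp only [false_iff]
      intro h
      simp only [beq_iff_eq, Bool.or_eq_true] at h1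
      exact (h (rr, cc) (Or.inl rfl)).1 h1
    · simp only [false_iff]
      intro h
      exact (h (rr, cc) (Or.inl rfl)).2 h2
    · rw [ih]
      constructor
      · intro h p hp
        rcases hp with hp | hp
        · subst hp
          refine ⟨?_, h2⟩
          simp only [beq_iff_eq, Bool.or_eq_true] at h1
          tauto
        · exact h p hp
      · intro h p hp; exact h p (Or.inr hp)

-- membership in a set built by folding `add ∘ f` over a list
theorem contains_foldl_add {α β : Type} [BEq α] [LawfulBEq α] (f : β → α)
    (l : List β) (s : PySem.Set α) (y : α) :
    PySem.Set.contains (l.foldl (fun t x => PySem.Set.add t (f x)) s) y = true ↔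
      y ∈ s ∨ ∃ x ∈ l, f x = y := by
  induction l generalizing s with
  | nil => simp
  | cons hd tl ih =>
    simp only [List.foldl_cons, ih, PySem.Set.mem_add, List.mem_cons]
    constructor
    · rintro (⟨h | h⟩ | ⟨x, hx, hfx⟩)
      · exact Or.inl h
      · exact Or.inr ⟨hd, Or.inl rfl, h.symm⟩
      · exact Or.inr ⟨x, Or.inr hx, hfx⟩
    · rintro (h | ⟨x, hx | hx, hfx⟩)
      · exact Or.inl (Or.inl h)
      · subst hx; exact Or.inl (Or.inr hfx.symm)
      · exact Or.inr ⟨x, hx, hfx⟩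

-- the triple fold of B is componentwise the three single folds
theorem triple_fold (l : List (Int × Int))
    (s1 : PySem.Set Int) (s2 : PySem.Set Int) (s3 : PySem.Set (Int × Int)) :
    l.foldl
      (fun (s : PySem.Set Int × PySem.Set Int × PySem.Set (Int × Int)) rc =>
        (PySem.Set.add s.1 rc.1, PySem.Set.add s.2.1 rc.2, PySem.Set.add s.2.2 rc))
      (s1, s2, s3)
    = (l.foldl (fun t x => PySem.Set.add t ((fun (p : Int × Int) => p.1) x)) s1,
       l.foldl (fun t x => PySem.Set.add t ((fun (p : Int × Int) => p.2) x)) s2,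
       l.foldl (fun t x => PySem.Set.add t ((fun (p : Int × Int) => p) x)) s3) := by
  induction l generalizing s1 s2 s3 with
  | nil => rfl
  | cons hd tl ih => simp only [List.foldl_cons, ih]

-- B returns true iff no cow conflicts (same characterisation as A's)
theorem alt_eq_true (pos : Int × Int) (l : List (Int × Int)) :
    is_position_valid_with_list_alt pos l = true ↔
      ∀ p ∈ l, ¬(p.1 = pos.1 ∨ p.2 = pos.2) ∧ ¬(|p.1 - pos.1| ≤ 1 ∧ |p.2 - pos.2| ≤ 1) := by
  obtain ⟨r, c⟩ := pos
  simp only [is_position_valid_with_list_alt, triple_fold]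
  cases hrc : (PySem.Set.contains
      (l.foldl (fun t x => PySem.Set.add t ((fun (p : Int × Int) => p.1) x)) PySem.Set.empty) r ||
      PySem.Set.contains
      (l.foldl (fun t x => PySem.Set.add t ((fun (p : Int × Int) => p.2) x)) PySem.Set.empty) c) with
  | true =>
    rw [if_pos rfl]
    simp only [Bool.false_eq_true, false_iff]
    rw [Bool.or_eq_true, contains_foldl_add, contains_foldl_add] at hrc
    simp only [PySem.Set.empty, List.not_mem_nil, false_or] at hrc
    intro h
    rcases hrc with ⟨x, hx, hfx⟩ | ⟨x, hx, hfx⟩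
    · exact (h x hx).1 (Or.inl hfx)
    · exact (h x hx).1 (Or.inr hfx)
  | false =>
    rw [if_neg Bool.false_ne_true]
    rw [Bool.or_eq_false_iff] at hrc
    obtain ⟨hr1, hc1⟩ := hrc
    have hrow : ∀ p ∈ l, p.1 ≠ r := by
      intro p hp hpe
      rw [Bool.eq_false_iff] at hr1
      exact hr1 ((contains_foldl_add _ l PySem.Set.empty r).mpr (Or.inr ⟨p, hp, hpe⟩))
    have hcol : ∀ p ∈ l, p.2 ≠ c := by
      intro p hp hpe
      rw [Bool.eq_false_iff] at hc1
      exact hc1 ((contains_foldl_add _ l PySem.Set.empty c).mpr (Or.inr ⟨p, hp, hpe⟩))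
    rw [Bool.not_eq_eq_eq_not, Bool.not_true, List.any_eq_false]
    constructor
    · intro h p hp
      refine ⟨fun hor => (hor.elim (hrow p hp) (hcol p hp)), ?_⟩
      rintro ⟨h1, h2⟩
      rw [abs_le] at h1 h2
      have hdr : p.1 - r ∈ ([-1, 0, 1] : List Int) := by
        simp only [List.mem_cons, List.not_mem_nil, or_false]; omega
      have hdc : p.2 - c ∈ ([-1, 0, 1] : List Int) := by
        simp only [List.mem_cons, List.not_mem_nil, or_false]; omega
      have h3 := h (p.1 - r) hdr
      rw [Bool.not_eq_true, List.any_eq_false] at h3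
      have h4 := h3 (p.2 - c) hdc
      rw [Bool.not_eq_true, Bool.eq_false_iff] at h4
      apply h4
      rw [contains_foldl_add]
      refine Or.inr ⟨p, hp, ?_⟩
      simp only [Prod.ext_iff]
      constructor <;> omega
    · intro h dr hdr
      rw [Bool.not_eq_true, List.any_eq_false]
      intro dc hdc
      rw [Bool.not_eq_true, Bool.eq_false_iff]
      intro hcon
      rw [contains_foldl_add] at hcon
      simp only [PySem.Set.empty, List.not_mem_nil, false_or] at hcon
      obtain ⟨p, hp, hfp⟩ := hcon
      have h1 := (h p hp).2
      simp only [List.mem_cons, List.not_mem_nil, or_false] at hdr hdc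
      apply h1
      have hpe : p.1 = r + dr ∧ p.2 = c + dc := by
        rw [Prod.ext_iff] at hfp; exact hfp
      rw [abs_le, abs_le]
      constructor <;> omega

-- ===== VERDICT (by name: the statement is the Claim_ definition above) =====
theorem is_position_valid_with_list_spec : Claim_equal_is_position_valid_with_list := by
  intro pos l _
  unfold Spec_is_position_valid_with_list
  have hA := pvLoopA_eq_true pos.1 pos.2 l
  have hB := alt_eq_true pos l
  by_cases h : ∀ p ∈ l, ¬(p.1 = pos.1 ∨ p.2 = pos.2) ∧ ¬(|p.1 - pos.1| ≤ 1 ∧ |p.2 - pos.2| ≤ 1)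
  · rw [show is_position_valid_with_list pos l = pvLoopA pos.1 pos.2 l from rfl,
      hA.mpr h, (hB.mpr h)]
  · have h1 : is_position_valid_with_list pos l = false := by
      rw [show is_position_valid_with_list pos l = pvLoopA pos.1 pos.2 l from rfl]
      rw [Bool.eq_false_iff]; intro hc; exact h (hA.mp hc)
    have h2 : is_position_valid_with_list_alt pos l = false := by
      rw [Bool.eq_false_iff]; intro hc; exact h (hB.mp hc)
    rw [h1, h2]
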